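-- pv_equiv track=rewrite | github.com/glaucioscheibel/nosqltrajectory | src/main/python/04 - Arquivos Antigos/Projeto desenvolvido Tkinter/projeto_trajetorias/trajetorias/trajetorias.py | relaciona_resultados_de_similaridade
-- ===== SOURCE A (Python) =====
-- def elimina_duplicidades(trajetorias_similares):
--     """Recebe lista de trajetórias encontradas e elimina as duplicidades existentes. Ex. de duplicidade: [(889,914),(914),(889)]"""
--     trajetorias_similares_validas = []
--     for tupla in trajetorias_similares:
--         if tupla[0] not in trajetorias_similares_validas and tupla[0][::-1] not in trajetorias_similares_validas:
--             trajetorias_similares_validas.append(tupla)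
--     return trajetorias_similares_validas
--
-- def relaciona_resultados_de_similaridade(trajetorias_tempo,trajetorias_comprimento):
--     """Relaciona resultados engajados em mais de um parâmetro de pesquisa."""
--     trajetorias_por_tempo_validas = elimina_duplicidades(trajetorias_tempo)
--     trajetorias_por_comprimento_validas = elimina_duplicidades(trajetorias_comprimento)
--
--     par_de_trajetorias_verificados = []
--     trajetorias_similares_relacionadas = []
--     for tupla in trajetorias_por_tempo_validas:
--         for par in trajetorias_por_comprimento_validas:
--             #Se o par da lista A for igual ao par da lista B -OU- o inverso do par da lista A for igual ao par da lista B
--             # -E- se o par não estiver na lista de pares já verificados -OU- seu inverso não estiver na lista de pares já verificados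
--             if (tupla[0] == par[0] or tupla[0][::-1] == par[0]) and (tupla[0] not in par_de_trajetorias_verificados and tupla[0][::-1] not in par_de_trajetorias_verificados):
--                 trajetorias_similares_relacionadas.append(((tupla[0][0],tupla[0][1]),tupla[1],par[1]))
--                 par_de_trajetorias_verificados.append(tupla[0])
--     return elimina_duplicidades(trajetorias_similares_relacionadas)
-- ===== SOURCE B (Python) =====
-- def relaciona_resultados_de_similaridade(trajetorias_tempo, trajetorias_comprimento):
--     """Relaciona resultados engajados em mais de um parâmetro de pesquisa."""
--     # first length value for each unordered pair
--     comprimento_por_par = {}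
--     for par, valor in trajetorias_comprimento:
--         chave = (min(par[0], par[1]), max(par[0], par[1]))
--         if chave not in comprimento_por_par:
--             comprimento_por_par[chave] = valor
--     vistos = set()
--     relacionadas = []
--     for par, valor in trajetorias_tempo:
--         chave = (min(par[0], par[1]), max(par[0], par[1]))
--         if chave not in vistos and chave in comprimento_por_par:
--             relacionadas.append(((par[0], par[1]), valor, comprimento_por_par[chave]))
--             vistos.add(chave)
--     return relacionadas
-- ===== Notes on version B (the rewrite author's own statement) =====
-- stated objective: faster
-- what changed: Replace A's nested scan of the time list against the length list (plus the no-op de-duplication passes) by one pass building a dict keyed on the normalized unordered pair (first length value wins) and one pass over the time list with a seen-set.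
import Mathlib
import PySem

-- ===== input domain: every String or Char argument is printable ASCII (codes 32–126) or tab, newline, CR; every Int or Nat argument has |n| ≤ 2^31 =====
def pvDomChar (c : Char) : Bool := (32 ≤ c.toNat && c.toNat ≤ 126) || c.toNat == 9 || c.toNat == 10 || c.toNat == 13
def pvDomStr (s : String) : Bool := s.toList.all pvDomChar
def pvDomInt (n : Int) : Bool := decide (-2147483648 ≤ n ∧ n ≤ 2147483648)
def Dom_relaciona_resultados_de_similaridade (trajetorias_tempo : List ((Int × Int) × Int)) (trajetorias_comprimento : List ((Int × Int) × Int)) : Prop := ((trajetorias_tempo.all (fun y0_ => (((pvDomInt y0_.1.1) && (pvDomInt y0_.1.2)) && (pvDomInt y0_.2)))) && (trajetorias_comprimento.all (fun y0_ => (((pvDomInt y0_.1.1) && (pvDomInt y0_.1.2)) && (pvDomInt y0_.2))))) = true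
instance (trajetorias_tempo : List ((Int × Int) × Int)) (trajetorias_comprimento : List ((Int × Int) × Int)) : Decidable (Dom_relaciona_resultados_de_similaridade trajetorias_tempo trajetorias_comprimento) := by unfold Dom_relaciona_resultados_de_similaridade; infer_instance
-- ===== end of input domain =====

-- B replaces A's nested scan over the two lists by a dict keyed on the normalized
-- (unordered) pair plus a seen-set, one pass over each list (objective: faster, asymptotic).

-- ===== PORT A =====
-- Python's `tupla[0] in lst` asks whether the pair (a,b) equals some list ELEMENT
-- ((c,d),v) resp. ((c,d),t,c'): tuple equality between these shapes is always False
-- for int components, so the membership test is ported exactly as this constant-false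
-- elementwise comparison.
def pvPairEqEntryT (_p : Int × Int) (_t : (Int × Int) × Int) : Bool := false
def pvPairEqEntryR (_p : Int × Int) (_t : (Int × Int) × Int × Int) : Bool := false

def elimina_duplicidades_T (trajetorias_similares : List ((Int × Int) × Int)) : List ((Int × Int) × Int) :=
  trajetorias_similares.foldl (fun acc t =>
    if !(acc.any (pvPairEqEntryT t.1)) && !(acc.any (pvPairEqEntryT (t.1.2, t.1.1)))
    then acc ++ [t] else acc) []

def elimina_duplicidades_R (trajetorias_similares : List ((Int × Int) × Int × Int)) : List ((Int × Int) × Int × Int) :=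
  trajetorias_similares.foldl (fun acc t =>
    if !(acc.any (pvPairEqEntryR t.1)) && !(acc.any (pvPairEqEntryR (t.1.2, t.1.1)))
    then acc ++ [t] else acc) []

def relaciona_resultados_de_similaridade (trajetorias_tempo : List ((Int × Int) × Int)) (trajetorias_comprimento : List ((Int × Int) × Int)) : List ((Int × Int) × Int × Int) :=
  let trajetorias_por_tempo_validas := elimina_duplicidades_T trajetorias_tempo
  let trajetorias_por_comprimento_validas := elimina_duplicidades_T trajetorias_comprimento
  let st := trajetorias_por_tempo_validas.foldl (fun st tupla =>
      trajetorias_por_comprimento_validas.foldl (fun st par =>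
        if (tupla.1 == par.1 || (tupla.1.2, tupla.1.1) == par.1)
            && (!(st.1.contains tupla.1) && !(st.1.contains (tupla.1.2, tupla.1.1)))
        then (st.1 ++ [tupla.1], st.2 ++ [((tupla.1.1, tupla.1.2), tupla.2, par.2)])
        else st) st)
    (([] : List (Int × Int)), ([] : List ((Int × Int) × Int × Int)))
  elimina_duplicidades_R st.2

-- ===== PORT B =====
def pvNorm (p : Int × Int) : Int × Int := (min p.1 p.2, max p.1 p.2)

def relaciona_resultados_de_similaridade_alt (trajetorias_tempo : List ((Int × Int) × Int)) (trajetorias_comprimento : List ((Int × Int) × Int)) : List ((Int × Int) × Int × Int) :=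
  let comprimento_por_par : PySem.Dict (Int × Int) Int :=
    trajetorias_comprimento.foldl (fun d e =>
      let chave := pvNorm e.1
      if d.contains chave then d else d.insert chave e.2) PySem.Dict.empty
  let res := trajetorias_tempo.foldl (fun (st : PySem.Set (Int × Int) × List ((Int × Int) × Int × Int)) e =>
      let chave := pvNorm e.1
      if !(PySem.Set.contains st.1 chave) then
        match comprimento_por_par.get? chave with
        | some v => (PySem.Set.add st.1 chave, st.2 ++ [((e.1.1, e.1.2), e.2, v)])
        | none => st
      else st)
    ((PySem.Set.empty : PySem.Set (Int × Int)), ([] : List ((Int × Int) × Int × Int)))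
  res.2

-- ===== PRECONDITION & SPEC =====
def Spec_relaciona_resultados_de_similaridade (trajetorias_tempo : List ((Int × Int) × Int)) (trajetorias_comprimento : List ((Int × Int) × Int)) (out : List ((Int × Int) × Int × Int)) : Prop := out = relaciona_resultados_de_similaridade_alt trajetorias_tempo trajetorias_comprimento
instance (trajetorias_tempo : List ((Int × Int) × Int)) (trajetorias_comprimento : List ((Int × Int) × Int)) (out : List ((Int × Int) × Int × Int)) : Decidable (Spec_relaciona_resultados_de_similaridade trajetorias_tempo trajetorias_comprimento out) := by unfold Spec_relaciona_resultados_de_similaridade; infer_instance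

-- ===== CLAIM (what is proved, stated in full; the proofs are below) =====
def Claim_equal_relaciona_resultados_de_similaridade : Prop := ∀ (trajetorias_tempo : List ((Int × Int) × Int)) (trajetorias_comprimento : List ((Int × Int) × Int)), Dom_relaciona_resultados_de_similaridade trajetorias_tempo trajetorias_comprimento → Spec_relaciona_resultados_de_similaridade trajetorias_tempo trajetorias_comprimento (relaciona_resultados_de_similaridade trajetorias_tempo trajetorias_comprimento)

-- ===== LEMMAS AND PROOFS =====

theorem flatten_map_singleton {α : Type} (ts : List α) : (List.map (fun x => [x]) ts).flatten = ts := by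
  induction ts with
  | nil => rfl
  | cons a l ih => simp [ih]

theorem elimT_id (ts : List ((Int × Int) × Int)) : elimina_duplicidades_T ts = ts := by
  simp [elimina_duplicidades_T, pvPairEqEntryT, flatten_map_singleton ts]

theorem elimR_id (ts : List ((Int × Int) × Int × Int)) : elimina_duplicidades_R ts = ts := by
  simp [elimina_duplicidades_R, pvPairEqEntryR, flatten_map_singleton ts]

-- matching a pair in either orientation is equality of normalized pairs
theorem match_eq (p : Int × Int) (q : Int × Int) :
    (p == q || (p.2, p.1) == q) = (pvNorm q == pvNorm p) := by
  rcases p with ⟨a, b⟩; rcases q with ⟨c, d⟩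
  rw [Bool.eq_iff_iff]
  simp only [Bool.or_eq_true, beq_iff_eq, Prod.mk.injEq, pvNorm]
  omega

-- membership of a pair (in either orientation) in the verified list is membership
-- of its normalized form in the normalized list
theorem contains_norm (ver : List (Int × Int)) (p : Int × Int) :
    ((ver.map pvNorm).contains (pvNorm p)) = (ver.contains p || ver.contains (p.2, p.1)) := by
  rw [Bool.eq_iff_iff]
  simp only [List.contains_iff_mem, Bool.or_eq_true, List.mem_map]
  constructor
  · rintro ⟨r, hr, hn⟩
    have := (Bool.eq_iff_iff.mp (match_eq p r)).mpr (by simp [hn])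
    simp only [Bool.or_eq_true, beq_iff_eq] at this
    rcases this with h | h
    · exact Or.inl (h ▸ hr)
    · right
      rcases p with ⟨a, b⟩; rcases r with ⟨c, d⟩
      simp only [Prod.mk.injEq] at h ⊢
      obtain ⟨h1, h2⟩ := h
      simpa [← h1, ← h2] using hr
  · rintro (h | h)
    · exact ⟨p, h, rfl⟩
    · refine ⟨(p.2, p.1), h, ?_⟩
      rcases p with ⟨a, b⟩
      simp only [pvNorm, Prod.mk.injEq]
      omega

-- the dict built by B performs first-match lookup on normalized keys
theorem comp_get (tc : List ((Int × Int) × Int)) (d : PySem.Dict (Int × Int) Int) (k : Int × Int) :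
    ((tc.foldl (fun d e => if d.contains (pvNorm e.1) then d else d.insert (pvNorm e.1) e.2) d).get? k)
      = (d.get? k).or ((tc.find? (fun e => pvNorm e.1 == k)).map (·.2)) := by
  induction tc generalizing d with
  | nil => simp
  | cons e tc ih =>
      simp only [List.foldl_cons, List.find?]
      by_cases hk : pvNorm e.1 = k
      · subst hk
        rw [PySem.Dict.contains_eq_isSome_get?]
        cases hd : d.get? (pvNorm e.1) with
        | some v => simp [hd, ih]
        | none =>
            simp only [Option.isSome_none, Bool.false_eq_true, if_false]
            rw [ih]
            simp [PySem.Dict.get?_insert_self]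
      · have hne : (pvNorm e.1 == k) = false := by simp [hk]
        rw [PySem.Dict.contains_eq_isSome_get?]
        cases hd : d.get? (pvNorm e.1) with
        | some v => simp [ih, hne]
        | none =>
            simp only [Option.isSome_none, Bool.false_eq_true, if_false, hne]
            rw [ih, PySem.Dict.get?_insert_of_ne _ _ (fun h => hk h.symm)]

-- A's inner fold: once the pair (in either orientation) is in the verified list the fold is inert
theorem inner_blocked (cv : List ((Int × Int) × Int)) (ver : List (Int × Int))
    (out : List ((Int × Int) × Int × Int)) (p : Int × Int) (t : Int)
    (h : ver.contains p = true ∨ ver.contains (p.2, p.1) = true) :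
    cv.foldl (fun st par =>
        if (p == par.1 || (p.2, p.1) == par.1)
            && (!(st.1.contains p) && !(st.1.contains (p.2, p.1)))
        then (st.1 ++ [p], st.2 ++ [((p.1, p.2), t, par.2)])
        else st) (ver, out) = (ver, out) := by
  induction cv with
  | nil => rfl
  | cons par cv ih =>
      simp only [List.foldl_cons]
      rcases h with h | h <;> simp only [h, Bool.not_true, Bool.false_and, Bool.and_false] <;>
        exact ih

-- A's inner fold appends the first matching pair's value, at most once
theorem inner_fold (cv : List ((Int × Int) × Int)) (ver : List (Int × Int))
    (out : List ((Int × Int) × Int × Int)) (p : Int × Int) (t : Int)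
    (hv : ver.contains p = false) (hv' : ver.contains (p.2, p.1) = false) :
    cv.foldl (fun st par =>
        if (p == par.1 || (p.2, p.1) == par.1)
            && (!(st.1.contains p) && !(st.1.contains (p.2, p.1)))
        then (st.1 ++ [p], st.2 ++ [((p.1, p.2), t, par.2)])
        else st) (ver, out)
      = match cv.find? (fun par => p == par.1 || (p.2, p.1) == par.1) with
        | some par => (ver ++ [p], out ++ [((p.1, p.2), t, par.2)])
        | none => (ver, out) := by
  induction cv with
  | nil => rfl
  | cons par cv ih =>
      simp only [List.foldl_cons, List.find?]
      cases hm : (p == par.1 || (p.2, p.1) == par.1) with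
      | false =>
          simp only [Bool.false_and]
          exact ih
      | true =>
          simp only [hv, hv', Bool.not_false, Bool.and_self, if_true]
          rw [inner_blocked]
          left
          simp

-- A's outer fold equals B's single pass, for any verified list / output accumulator
theorem main_fold (cv : List ((Int × Int) × Int)) (comp : PySem.Dict (Int × Int) Int)
    (hcomp : ∀ k, comp.get? k = (cv.find? (fun e => pvNorm e.1 == k)).map (·.2))
    (tt : List ((Int × Int) × Int)) (ver : List (Int × Int))
    (out : List ((Int × Int) × Int × Int)) :
    (tt.foldl (fun st tupla =>
        cv.foldl (fun st par =>
          if (tupla.1 == par.1 || (tupla.1.2, tupla.1.1) == par.1)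
              && (!(st.1.contains tupla.1) && !(st.1.contains (tupla.1.2, tupla.1.1)))
          then (st.1 ++ [tupla.1], st.2 ++ [((tupla.1.1, tupla.1.2), tupla.2, par.2)])
          else st) st) (ver, out)).2
      = (tt.foldl (fun (st : PySem.Set (Int × Int) × List ((Int × Int) × Int × Int)) e =>
          if !(PySem.Set.contains st.1 (pvNorm e.1)) then
            match comp.get? (pvNorm e.1) with
            | some v => (PySem.Set.add st.1 (pvNorm e.1), st.2 ++ [((e.1.1, e.1.2), e.2, v)])
            | none => st
          else st) (ver.map pvNorm, out)).2 := by
  induction tt generalizing ver out with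
  | nil => rfl
  | cons e tt ih =>
      simp only [List.foldl_cons]
      have hc : PySem.Set.contains (ver.map pvNorm) (pvNorm e.1)
          = (ver.contains e.1 || ver.contains (e.1.2, e.1.1)) := contains_norm ver e.1
      cases hb : (ver.contains e.1 || ver.contains (e.1.2, e.1.1)) with
      | true =>
          rw [inner_blocked cv ver out e.1 e.2 (by
            rcases Bool.or_eq_true_iff.mp hb with h | h
            · exact Or.inl h
            · exact Or.inr h)]
          rw [hc, hb]
          simp only [Bool.not_true, Bool.false_eq_true, if_false]
          exact ih ver out
      | false =>
          have hv : ver.contains e.1 = false := by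
            cases h : ver.contains e.1 <;> simp_all
          have hv' : ver.contains (e.1.2, e.1.1) = false := by
            cases h : ver.contains (e.1.2, e.1.1) <;> simp_all
          rw [inner_fold cv ver out e.1 e.2 hv hv']
          rw [hc, hb]
          simp only [Bool.not_false, if_true]
          rw [hcomp (pvNorm e.1)]
          have hfind : cv.find? (fun par : (Int × Int) × Int => pvNorm par.1 == pvNorm e.1)
              = cv.find? (fun par => e.1 == par.1 || (e.1.2, e.1.1) == par.1) := by
            congr 1
            funext par
            exact (match_eq e.1 par.1).symm
          rw [hfind]
          cases hf : cv.find? (fun par => e.1 == par.1 || (e.1.2, e.1.1) == par.1) with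
          | none => exact ih ver out
          | some par =>
              simp only [Option.map_some]
              have hadd : PySem.Set.add (ver.map pvNorm) (pvNorm e.1)
                  = (ver ++ [e.1]).map pvNorm := by
                simp only [PySem.Set.add, hc, hb, Bool.false_eq_true, if_false, List.map_append,
                  List.map_cons, List.map_nil]
              rw [hadd]
              exact ih (ver ++ [e.1]) (out ++ [((e.1.1, e.1.2), e.2, par.2)])

-- ===== VERDICT (by name: the statement is the Claim_ definition above) =====
theorem relaciona_resultados_de_similaridade_spec : Claim_equal_relaciona_resultados_de_similaridade := by
  intro tt tc _
  show relaciona_resultados_de_similaridade tt tc = relaciona_resultados_de_similaridade_alt tt tc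
  unfold relaciona_resultados_de_similaridade relaciona_resultados_de_similaridade_alt
  rw [elimT_id, elimT_id]
  rw [elimR_id]
  exact main_fold tc _ (fun k => by rw [comp_get]; simp) tt [] []
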